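-- pv_equiv track=rewrite | github.com/husnainalix77/HusnainPythonPortfolio | 2048-Game/2048_game.py | move_down
-- ===== SOURCE A (Python) =====
-- def set_up_grid(n):
--     'Initializes grid to all zeros'
--     new_grid = [[0 for _ in range(n)] for _ in range(n)]
--     return new_grid
--
-- def get_column(grid, col_num): ## Especially for moveUp and moveDown
--     'Finds a column in the grid'
--     col = [row[col_num] for row in grid ]
--     return col
--
-- def compress_row(row):
--     'Moves non-zero values to left '
--     new_row = [n for n in row if n!=0] ## Finds non-zero values
--     new_row += [0]*(len(row)-len(new_row)) ## Combines zeros and non-zero values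
--     return new_row
--
-- def merge_row(row):
--     'Returns a merged row'
--     for i in range(len(row)-1):
--         if row[i] == row[i+1] and row[i]!=0:  ## Checks two consecutive cells are same and non-zero
--             row[i]+=row[i] #adds non- zero same cells
--             row[i+1] = 0 # at second cell, inserts a zero
--     return row
--
-- def move_down(grid):
--     'Moves tiles down with non-zero elements'
--     n = len(grid)
--     new_grid = set_up_grid(n)
--     for col_num in range(n):
--         col = get_column(grid, col_num)   # extract column
--         col = col[::-1]                  # reverse (simulate falling down)
--         col = compress_row(col)
--         col = merge_row(col)
--         col = compress_row(col)
--         col = col[::-1]                  # reverse back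
--         for row_num in range(n):
--             new_grid[row_num][col_num] = col[row_num]
--     return new_grid
-- ===== SOURCE B (Python) =====
-- def move_down(grid):
--     'Moves tiles down with non-zero elements'
--     n = len(grid)
--     cols = []
--     for j in range(n):
--         tiles = []          # merged column read bottom-up
--         merged = False      # last pushed tile already merged this pass?
--         for i in range(n - 1, -1, -1):
--             v = grid[i][j]
--             if v == 0:
--                 continue
--             if tiles and not merged and tiles[-1] == v:
--                 tiles[-1] = 2 * v
--                 merged = True
--             else:
--                 tiles.append(v)
--                 merged = False
--         cols.append([0] * (n - len(tiles)) + tiles[::-1])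
--     return [[cols[j][i] for j in range(n)] for i in range(n)]
-- ===== Notes on version B (the rewrite author's own statement) =====
-- stated objective: simpler
-- what changed: Replaces A's per-column reverse/compress/merge/compress/reverse pipeline (with an index-mutating merge loop and cell-by-cell writes into a preallocated grid) by one bottom-up pass per column that collects non-zero tiles with a 'just merged' flag, then assembles the result grid as a transpose comprehension.
import Mathlib
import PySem

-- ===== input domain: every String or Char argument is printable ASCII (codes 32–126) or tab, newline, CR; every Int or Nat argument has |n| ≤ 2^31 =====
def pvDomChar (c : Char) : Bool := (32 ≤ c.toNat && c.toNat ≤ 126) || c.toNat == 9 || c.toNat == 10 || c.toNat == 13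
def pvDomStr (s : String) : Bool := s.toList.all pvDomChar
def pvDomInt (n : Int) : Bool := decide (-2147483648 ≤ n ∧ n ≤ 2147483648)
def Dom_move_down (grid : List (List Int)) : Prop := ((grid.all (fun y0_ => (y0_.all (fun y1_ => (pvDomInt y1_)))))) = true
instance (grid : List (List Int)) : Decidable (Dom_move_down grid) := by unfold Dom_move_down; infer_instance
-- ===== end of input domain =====

-- B replaces A's per-column reverse/compress/merge/compress/reverse pipeline by one
-- bottom-up pass per column with a 'just merged' flag (objective: simpler). A mutates
-- only the grid it freshly allocates, never its argument.

-- ===== PORT A =====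
def set_up_grid (n : Nat) : List (List Int) :=
  (List.range n).map (fun _ => (List.range n).map (fun _ => (0 : Int)))

def get_column (grid : List (List Int)) (j : Nat) : List Int :=
  grid.map (fun row => row.getD j 0)

def compress_row (row : List Int) : List Int :=
  let nr := row.filter (· ≠ 0)
  nr ++ List.replicate (row.length - nr.length) (0 : Int)

def merge_step (r : List Int) (i : Nat) : List Int :=
  if r.getD i 0 = r.getD (i + 1) 0 ∧ r.getD i 0 ≠ 0 then
    (r.set i (r.getD i 0 + r.getD i 0)).set (i + 1) 0
  else r

def merge_row (row : List Int) : List Int :=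
  (List.range (row.length - 1)).foldl merge_step row

def move_down (grid : List (List Int)) : List (List Int) :=
  let n := grid.length
  (List.range n).foldl (fun g j =>
    let col := (compress_row (merge_row (compress_row ((get_column grid j).reverse)))).reverse
    (List.range n).foldl (fun g i => g.set i ((g.getD i []).set j (col.getD i 0))) g)
    (set_up_grid n)

-- ===== PORT B =====
def alt_step (st : List Int × Bool) (v : Int) : List Int × Bool :=
  if v = 0 then st
  else if st.1 ≠ [] ∧ st.2 = false ∧ st.1.getLast? = some v then (st.1.dropLast ++ [2 * v], true)
  else (st.1 ++ [v], false)

def alt_col (grid : List (List Int)) (n j : Nat) : List Int :=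
  let tiles := ((List.range n).reverse.foldl
      (fun st i => alt_step st ((grid.getD i []).getD j 0)) ([], false)).1
  List.replicate (n - tiles.length) 0 ++ tiles.reverse

def move_down_alt (grid : List (List Int)) : List (List Int) :=
  let n := grid.length
  let cols := (List.range n).foldl (fun cs j => cs ++ [alt_col grid n j]) []
  (List.range n).map (fun i => (List.range n).map (fun j => (cols.getD j []).getD i 0))

-- ===== PRECONDITION & SPEC =====
-- Pre_ excludes exactly the ragged grids on which Python A raises IndexError
-- (some row shorter than the number of rows); Python B raises there too.
def Pre_move_down (grid : List (List Int)) : Prop :=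
  ∀ row ∈ grid, grid.length ≤ row.length
instance (grid : List (List Int)) : Decidable (Pre_move_down grid) := by
  unfold Pre_move_down; infer_instance

def pvWitness_move_down : List (List Int) := [[2, 0, 2], [2, 0, 0], [4, 2, 2]]

def Spec_move_down (grid : List (List Int)) (out : List (List Int)) : Prop := out = move_down_alt grid
instance (grid : List (List Int)) (out : List (List Int)) : Decidable (Spec_move_down grid out) := by unfold Spec_move_down; infer_instance

-- ===== CLAIM (what is proved, stated in full; the proofs are below) =====
def Claim_equal_move_down : Prop := ∀ (grid : List (List Int)), Dom_move_down grid → Pre_move_down grid → Spec_move_down grid (move_down grid)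

-- ===== LEMMAS AND PROOFS =====
theorem foldl_snoc_eq_map {α : Type} (f : Nat → α) :
    ∀ (l : List Nat) (acc : List α), l.foldl (fun cs j => cs ++ [f j]) acc = acc ++ l.map f := by
  intro l
  induction l with
  | nil => simp
  | cons a t ih => intro acc; simp [List.foldl_cons, ih]

theorem map_eq_range_map {α β : Type} (d : α) (g : List α) (f : α → β) :
    g.map f = (List.range g.length).map (fun i => f (g.getD i d)) := by
  apply List.ext_getElem
  · simp
  · intro i h1 h2
    simp [List.getD_eq_getElem?_getD, (by simpa using h2 : i < g.length)]
theorem getD_append_add {α : Type} (pre : List α) (rest : List α) (i : Nat) (d : α) :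
    (pre ++ rest).getD (pre.length + i) d = rest.getD i d := by
  induction pre with
  | nil => simp
  | cons a t ih => simpa [Nat.succ_add] using ih

theorem set_append_add {α : Type} (pre : List α) (rest : List α) (i : Nat) (y : α) :
    (pre ++ rest).set (pre.length + i) y = pre ++ rest.set i y := by
  induction pre with
  | nil => simp
  | cons a t ih => simpa [Nat.succ_add] using ih

theorem getD_append_cons {α : Type} (pre : List α) (x : α) (rest : List α) (d : α) :
    (pre ++ x :: rest).getD pre.length d = x := by
  simpa using getD_append_add pre (x :: rest) 0 d

theorem set_append_len {α : Type} (pre : List α) (x : α) (rest : List α) (y : α) :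
    (pre ++ x :: rest).set pre.length y = pre ++ y :: rest := by
  simpa using set_append_add pre (x :: rest) 0 y

theorem foldl_set_range' {α : Type} (d : α) (F : Nat → α → α) :
    ∀ (m k : Nat) (g : List α), k + m = g.length →
      (List.range' k m).foldl (fun g i => g.set i (F i (g.getD i d))) g
        = g.take k ++ (List.range' k m).map (fun i => F i (g.getD i d)) := by
  intro m
  induction m with
  | zero =>
    intro k g h
    have hle : g.length ≤ k := by omega
    simp [List.take_of_length_le hle]
  | succ m ih =>
    intro k g h
    have hk : k < g.length := by omega
    obtain ⟨pre, x, rest, hg, hpre⟩ : ∃ pre x rest, g = pre ++ x :: rest ∧ pre.length = k := by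
      refine ⟨g.take k, g[k], g.drop (k+1), ?_, by simp [hk.le]⟩
      conv_lhs => rw [← List.take_append_drop k g]
      congr 1
      rw [List.drop_eq_getElem_cons hk]
    subst hg
    have hgetk : (pre ++ x :: rest).getD k d = x := by rw [← hpre]; exact getD_append_cons ..
    have hset : (pre ++ x :: rest).set k (F k ((pre ++ x :: rest).getD k d))
        = pre ++ F k x :: rest := by rw [hgetk, ← hpre, set_append_len]
    rw [List.range'_succ, List.foldl_cons]
    rw [hset, ih (k+1) (pre ++ F k x :: rest) (by simp at h ⊢; omega)]
    have htake : (pre ++ F k x :: rest).take (k+1) = pre ++ [F k x] := by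
      rw [← hpre]; simp [List.take_append]
    rw [htake]
    have hgetD : ∀ i ∈ List.range' (k+1) m,
        (pre ++ F k x :: rest).getD i d = (pre ++ x :: rest).getD i d := by
      intro i hi
      have : k + 1 ≤ i := (List.mem_range'_1.mp hi).1
      rcases Nat.exists_eq_add_of_le this with ⟨m', rfl⟩
      have e1 : (pre ++ F k x :: rest).getD (k + 1 + m') d = rest.getD m' d := by
        have := getD_append_add (pre ++ [F k x]) rest m' d
        simpa [hpre, Nat.add_assoc] using this
      have e2 : (pre ++ x :: rest).getD (k + 1 + m') d = rest.getD m' d := by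
        have := getD_append_add (pre ++ [x]) rest m' d
        simpa [hpre, Nat.add_assoc] using this
      rw [e1, e2]
    have hmap := List.map_congr_left (fun i hi => by rw [hgetD i hi] :
        ∀ i ∈ List.range' (k+1) m, F i ((pre ++ F k x :: rest).getD i d) = F i ((pre ++ x :: rest).getD i d))
    rw [hmap]
    have hrhs : (pre ++ x :: rest).take k = pre := by rw [← hpre]; simp
    rw [hrhs, List.map_cons, hgetk]
    simp

def mergeRec : List Int → List Int
  | [] => []
  | [a] => [a]
  | a :: b :: t => if a = b ∧ a ≠ 0 then (a + a) :: 0 :: mergeRec t else a :: mergeRec (b :: t)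

def pairRec : List Int → List Int
  | [] => []
  | [a] => [a]
  | a :: b :: t => if a = b then (a + a) :: pairRec t else a :: pairRec (b :: t)


theorem mergeRec_length : ∀ w : List Int, (mergeRec w).length = w.length := by
  intro w
  induction w using mergeRec.induct with
  | case1 => simp [mergeRec]
  | case2 => simp [mergeRec]
  | case3 a b t h ih => simp only [mergeRec, if_pos h, List.length_cons, ih]
  | case4 a b t h ih => simp only [mergeRec, if_neg h, List.length_cons, ih]

theorem mergeRec_zeros : ∀ l : List Int, (∀ x ∈ l, x = 0) → mergeRec l = l := by
  intro l
  induction l using mergeRec.induct with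
  | case1 => simp [mergeRec]
  | case2 => simp [mergeRec]
  | case3 a b t h ih =>
    intro hz; exact absurd (hz a (by simp)) (by simpa using h.2)
  | case4 a b t h ih =>
    intro hz
    simp only [mergeRec, if_neg h]
    rw [ih (fun x hx => hz x (List.mem_cons_of_mem a hx))]

theorem merge_loop (xs : List Int) :
    ∀ pre : List Int,
      (List.range' pre.length (xs.length - 1)).foldl merge_step (pre ++ xs) = pre ++ mergeRec xs := by
  induction xs using mergeRec.induct with
  | case1 => intro pre; simp [mergeRec]
  | case2 a => intro pre; simp [mergeRec]
  | case3 a b t h ih =>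
    intro pre
    have hlen : (a :: b :: t).length - 1 = t.length + 1 := by simp
    rw [hlen, List.range'_succ, List.foldl_cons]
    have hga : (pre ++ a :: b :: t).getD pre.length 0 = a := getD_append_cons ..
    have hgb : (pre ++ a :: b :: t).getD (pre.length + 1) 0 = b := by
      simpa using getD_append_add (pre ++ [a]) (b :: t) 0 0
    have hstep : merge_step (pre ++ a :: b :: t) pre.length = pre ++ (a + a) :: 0 :: t := by
      unfold merge_step
      rw [hga, hgb, if_pos h]
      rw [set_append_len]
      simpa using set_append_add (pre ++ [a + a]) (b :: t) 0 0
    rw [hstep]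
    rw [mergeRec, if_pos h]
    cases t with
    | nil => simp [mergeRec]
    | cons x t' =>
      have hr : List.range' (pre.length + 1) (x :: t').length
          = (pre.length + 1) :: List.range' (pre.length + 2) t'.length := by
        simp [List.range'_succ]
      rw [hr, List.foldl_cons]
      have hg0 : (pre ++ (a + a) :: 0 :: x :: t').getD (pre.length + 1) 0 = 0 := by
        simpa using getD_append_add (pre ++ [a + a]) (0 :: x :: t') 0 0
      have hstep2 : merge_step (pre ++ (a + a) :: 0 :: x :: t') (pre.length + 1)
          = pre ++ (a + a) :: 0 :: x :: t' := by
        unfold merge_step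
        rw [hg0]
        simp
      rw [hstep2]
      have := ih (pre ++ [a + a, 0])
      simpa [Nat.add_assoc] using this
  | case4 a b t h ih =>
    intro pre
    have hlen : (a :: b :: t).length - 1 = t.length + 1 := by simp
    rw [hlen, List.range'_succ, List.foldl_cons]
    have hga : (pre ++ a :: b :: t).getD pre.length 0 = a := getD_append_cons ..
    have hgb : (pre ++ a :: b :: t).getD (pre.length + 1) 0 = b := by
      simpa using getD_append_add (pre ++ [a]) (b :: t) 0 0
    have hstep : merge_step (pre ++ a :: b :: t) pre.length = pre ++ a :: b :: t := by
      unfold merge_step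
      rw [hga, hgb, if_neg h]
    rw [hstep]
    rw [mergeRec, if_neg h]
    have := ih (pre ++ [a])
    simpa using this

theorem merge_row_eq_mergeRec (row : List Int) :
    (List.range (row.length - 1)).foldl merge_step row = mergeRec row := by
  have := merge_loop row []
  simpa [List.range_eq_range'] using this

theorem filter_mergeRec (xs : List Int) :
    ∀ z, (∀ x ∈ xs, x ≠ 0) →
      (mergeRec (xs ++ List.replicate z 0)).filter (· ≠ 0) = pairRec xs := by
  induction xs using pairRec.induct with
  | case1 =>
    intro z _
    rw [List.nil_append, mergeRec_zeros _ (by simp), pairRec]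
    simp
  | case2 a =>
    intro z hz
    have ha : a ≠ 0 := hz a (by simp)
    cases z with
    | zero => simp [mergeRec, pairRec, ha]
    | succ w =>
      rw [List.singleton_append, List.replicate_succ]
      rw [show mergeRec (a :: 0 :: List.replicate w 0)
          = if a = 0 ∧ a ≠ 0 then (a + a) :: 0 :: mergeRec (List.replicate w 0)
            else a :: mergeRec (0 :: List.replicate w 0) from rfl,
        if_neg (by tauto), mergeRec_zeros _ (by simp)]
      simp [pairRec, ha]
  | case3 b t ih =>
    intro z hz
    have hb : b ≠ 0 := hz b (by simp)
    rw [List.cons_append, List.cons_append]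
    rw [show mergeRec (b :: b :: (t ++ List.replicate z 0))
        = if b = b ∧ b ≠ 0 then (b + b) :: 0 :: mergeRec (t ++ List.replicate z 0)
          else b :: mergeRec (b :: (t ++ List.replicate z 0)) from rfl,
      if_pos ⟨rfl, hb⟩]
    have hbb : b + b ≠ 0 := by omega
    simp only [List.filter_cons]
    rw [ih z (fun x hx => hz x (by simp [hx]))]
    simp [pairRec, hbb]
  | case4 a b t h ih =>
    intro z hz
    have ha : a ≠ 0 := hz a (by simp)
    rw [List.cons_append]
    rw [show mergeRec (a :: (b :: t ++ List.replicate z 0))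
        = if a = b ∧ a ≠ 0 then (a + a) :: 0 :: mergeRec (t ++ List.replicate z 0)
          else a :: mergeRec (b :: (t ++ List.replicate z 0)) from rfl,
      if_neg (by tauto)]
    simp only [List.filter_cons]
    have hih := ih z (fun x hx => hz x (by simp at hx ⊢; tauto))
    rw [List.cons_append] at hih
    rw [hih]
    simp [pairRec, ha, h]


theorem alt_fold_skip_zeros :
    ∀ (l : List Int) (st : List Int × Bool),
      l.foldl alt_step st = (l.filter (· ≠ 0)).foldl alt_step st := by
  intro l
  induction l with
  | nil => simp
  | cons a t ih =>
    intro st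
    by_cases ha : a = 0
    · subst ha
      simp [alt_step, ih]
    · simp [ha, List.foldl_cons, ih]

theorem alt_push (acc : List Int) (merged : Bool) (a : Int) (ha : a ≠ 0)
    (hg : merged = true ∨ acc.getLast? ≠ some a) :
    alt_step (acc, merged) a = (acc ++ [a], false) := by
  unfold alt_step
  rw [if_neg ha, if_neg]
  rcases hg with h | h
  · simp [h]
  · simp
    intro _ _
    exact fun hc => h (by rw [hc])
  
theorem alt_fold_pairRec (xs : List Int) :
    (∀ x ∈ xs, x ≠ 0) →
      ∀ (acc : List Int) (merged : Bool),
        (merged = true ∨ ∀ v, xs.head? = some v → acc.getLast? ≠ some v) →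
        (xs.foldl alt_step (acc, merged)).1 = acc ++ pairRec xs := by
  induction xs using pairRec.induct with
  | case1 => intro _ acc merged _; simp [pairRec]
  | case2 a =>
    intro hz acc merged hg
    have ha : a ≠ 0 := hz a (by simp)
    rw [List.foldl_cons, alt_push acc merged a ha (hg.imp id (fun h2 => h2 a rfl))]
    simp [pairRec]
  | case3 b t ih =>
    intro hz acc merged hg
    have hb : b ≠ 0 := hz b (by simp)
    have hmerge : alt_step (acc ++ [b], false) b = (acc ++ [2 * b], true) := by
      unfold alt_step
      rw [if_neg hb, if_pos (by simp)]
      simp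
    rw [List.foldl_cons, alt_push acc merged b hb (hg.imp id (fun h2 => h2 b rfl)),
      List.foldl_cons, hmerge,
      ih (fun x hx => hz x (by simp [hx])) (acc ++ [2 * b]) true (Or.inl rfl)]
    simp only [pairRec]
    simp [two_mul]
  | case4 a b t h ih =>
    intro hz acc merged hg
    have ha : a ≠ 0 := hz a (by simp)
    rw [List.foldl_cons, alt_push acc merged a ha (hg.imp id (fun h2 => h2 a rfl)),
      ih (fun x hx => hz x (by simp [hx])) (acc ++ [a]) false
        (Or.inr (by
          intro v hv hcon
          simp at hv hcon
          exact h (by omega)))]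
    simp [pairRec, h]




theorem col_eq (grid : List (List Int)) (j : Nat) :
    (compress_row ((List.range ((compress_row ((get_column grid j).reverse)).length - 1)).foldl
        merge_step (compress_row ((get_column grid j).reverse)))).reverse
      = alt_col grid grid.length j := by
  set c := get_column grid j with hc
  have hclen : c.length = grid.length := by simp [hc, get_column]
  set l := c.reverse with hl
  have hllen : l.length = grid.length := by simp [hl, hclen]
  set xs := l.filter (· ≠ 0) with hxs
  have hzf : ∀ x ∈ xs, x ≠ 0 := by
    intro x hx; rw [hxs, List.mem_filter] at hx; simpa using hx.2
  have hxle : xs.length ≤ l.length := by rw [hxs]; exact List.length_filter_le _ _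
  rw [merge_row_eq_mergeRec]
  have h2 : compress_row l = xs ++ List.replicate (l.length - xs.length) 0 := rfl
  rw [h2]
  have hlen2 : (mergeRec (xs ++ List.replicate (l.length - xs.length) 0)).length = l.length := by
    rw [mergeRec_length]; simp; omega
  have h3 : compress_row (mergeRec (xs ++ List.replicate (l.length - xs.length) 0))
      = pairRec xs ++ List.replicate (l.length - (pairRec xs).length) 0 := by
    unfold compress_row
    rw [filter_mergeRec xs (l.length - xs.length) hzf, hlen2]
  rw [h3, List.reverse_append, List.reverse_replicate]
  unfold alt_col
  have hread : (List.range grid.length).reverse.foldl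
      (fun st i => alt_step st ((grid.getD i []).getD j 0)) ([], false)
      = l.foldl alt_step ([], false) := by
    rw [← List.foldl_map]
    congr 1
    rw [List.map_reverse]
    congr 1
    rw [hc]
    unfold get_column
    exact (map_eq_range_map ([]) grid (fun row => row.getD j 0)).symm
  have htiles : (l.foldl alt_step ([], false)).1 = pairRec xs := by
    rw [alt_fold_skip_zeros, ← hxs]
    exact alt_fold_pairRec xs hzf [] false (Or.inr (fun v _ => by simp))
  simp only [hread, htiles, hllen]


theorem col_eq' (grid : List (List Int)) (j : Nat) :
    (compress_row (merge_row (compress_row ((get_column grid j).reverse)))).reverse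
      = alt_col grid grid.length j := by
  unfold merge_row
  exact col_eq grid j




theorem inner_write (n j : Nat) (c : List Int) (G : List (List Int)) (hG : G.length = n) :
    (List.range n).foldl (fun g i => g.set i ((g.getD i []).set j (c.getD i 0))) G
      = (List.range n).map (fun i => (G.getD i []).set j (c.getD i 0)) := by
  have := foldl_set_range' ([] : List Int) (fun i row => row.set j (c.getD i 0)) n 0 G (by omega)
  simpa [List.range_eq_range'] using this

theorem getD_map_range {α : Type} (n j : Nat) (f : Nat → α) (d : α) (hj : j < n) :
    ((List.range n).map f).getD j d = f j := by
  rw [List.getD_eq_getElem?_getD]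
  simp [hj]

theorem outer_write (n : Nat) (colf : Nat → List Int) :
    ∀ (js : List Nat) (rowf : Nat → List Int),
      js.foldl (fun g j =>
          (List.range n).foldl (fun g i => g.set i ((g.getD i []).set j ((colf j).getD i 0))) g)
        ((List.range n).map rowf)
      = (List.range n).map (fun i => js.foldl (fun r j => r.set j ((colf j).getD i 0)) (rowf i)) := by
  intro js
  induction js with
  | nil => intro rowf; rfl
  | cons j js' ih =>
    intro rowf
    rw [List.foldl_cons,
      inner_write n j (colf j) ((List.range n).map rowf) (by simp)]
    have hmap : (List.range n).map (fun i => (((List.range n).map rowf).getD i []).set j ((colf j).getD i 0))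
        = (List.range n).map (fun i => (rowf i).set j ((colf j).getD i 0)) :=
      List.map_congr_left (fun i hi => by
        rw [getD_map_range n i rowf [] (List.mem_range.mp hi)])
    rw [hmap, ih (fun i => (rowf i).set j ((colf j).getD i 0))]
    simp

theorem row_write (n : Nat) (v : Nat → Int) :
    (List.range n).foldl (fun r j => r.set j (v j)) (List.replicate n 0)
      = (List.range n).map v := by
  have := foldl_set_range' (0 : Int) (fun j _ => v j) n 0 (List.replicate n 0) (by simp)
  simpa [List.range_eq_range'] using this

theorem move_down_eq_alt (grid : List (List Int)) : move_down grid = move_down_alt grid := by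
  unfold move_down move_down_alt set_up_grid
  dsimp only
  rw [foldl_snoc_eq_map (alt_col grid grid.length) (List.range grid.length) []]
  rw [outer_write grid.length
      (fun j => (compress_row (merge_row (compress_row ((get_column grid j).reverse)))).reverse)
      (List.range grid.length) (fun _ => (List.range grid.length).map (fun _ => (0 : Int)))]
  simp only [List.nil_append]
  apply List.map_congr_left
  intro i _
  rw [show (List.range grid.length).map (fun _ => (0 : Int)) = List.replicate grid.length 0 by simp,
    row_write grid.length (fun j => ((compress_row (merge_row (compress_row ((get_column grid j).reverse)))).reverse).getD i 0)]
  apply List.map_congr_left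
  intro j hj
  rw [getD_map_range grid.length j (alt_col grid grid.length) [] (List.mem_range.mp hj)]
  rw [col_eq' grid j]

-- ===== VERDICT (by name: the statement is the Claim_ definition above) =====
theorem move_down_spec : Claim_equal_move_down := by
  intro grid _ _
  unfold Spec_move_down
  exact move_down_eq_alt grid
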